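-- pv_equiv track=rewrite | github.com/PatzEdi/AndroidSecretary | src/flask_backend.py | remove_messages
-- ===== SOURCE A (Python) =====
-- def remove_messages(sender_number, chat_log):
--     """
--     Remove messages sent by the sender from the chat log.
--
--     Args:
--         sender_number (str): The sender's phone number.
--         chat_log (list): Chat log containing messages.
--
--     Returns:
--         list: Updated chat log with sender's messages removed.
--     """
--     i = 0
--     while i < len(chat_log):
--         if chat_log[i].find(sender_number) == 0:
--             chat_log.pop(i)
--             chat_log.pop(i)
--             continue # We skip the increment of i, as we have removed two elements from the list.
--         i += 2
--     return chat_log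
-- ===== SOURCE B (Python) =====
-- def remove_messages(sender_number, chat_log):
--     """
--     Remove messages sent by the sender from the chat log.
--
--     Single left-to-right pass: walk the log two entries (header, message) at a
--     time and keep only the pairs whose header does not start with the sender's
--     number, then write the kept entries back into chat_log.
--     """
--     kept = []
--     n = len(chat_log)
--     i = 0
--     while i < n:
--         if not chat_log[i].startswith(sender_number):
--             kept += chat_log[i:i+2]
--         i += 2
--     chat_log[:] = kept
--     return chat_log
-- ===== Notes on version B (the rewrite author's own statement) =====
-- stated objective: alternative
-- what changed: A scans with an index and pops each matching (header, message) pair out of the list in place, re-testing the element that slides into the gap; B makes one pass over the pairs, collecting the kept ones into a new list and writing it back.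
import Mathlib
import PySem

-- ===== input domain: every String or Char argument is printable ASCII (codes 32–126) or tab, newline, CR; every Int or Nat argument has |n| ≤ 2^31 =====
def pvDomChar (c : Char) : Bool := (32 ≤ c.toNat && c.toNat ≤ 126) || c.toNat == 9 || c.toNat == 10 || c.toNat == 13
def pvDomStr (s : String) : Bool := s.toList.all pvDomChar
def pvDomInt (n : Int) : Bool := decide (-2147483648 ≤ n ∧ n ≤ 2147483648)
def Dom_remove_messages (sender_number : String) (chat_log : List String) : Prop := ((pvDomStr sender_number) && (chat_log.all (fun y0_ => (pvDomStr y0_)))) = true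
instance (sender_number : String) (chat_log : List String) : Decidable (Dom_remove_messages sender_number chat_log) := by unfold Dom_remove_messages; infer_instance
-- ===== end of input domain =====

-- B collects the kept (header, message) pairs into a new list in a single pass instead
-- of popping matching pairs out of the list in place; equivalence is about the RETURN
-- value (Python A and Python B both also mutate chat_log in place).

-- ===== PORT A =====
-- A's while-loop: state (i, log); on a matching header pop(i) twice, else i += 2.
def removeLoopA (s : String) (i : Nat) (log : List String) : List String :=
  if h : i < log.length then
    if PySem.Str.find (log[i]'h) s = 0 then
      match h1 : PySem.List.pop? log (i : Int) with
      | some (_, l1) =>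
        match h2 : PySem.List.pop? l1 (i : Int) with
        | some (_, l2) => removeLoopA s i l2
        | none => l1      -- Python raises IndexError here (excluded by Pre_)
      | none => log       -- unreachable: i < len log
    else removeLoopA s (i + 2) log
  else log
termination_by log.length - i
decreasing_by
  · have e1 := PySem.List.length_of_pop?_eq_some _ h1
    have e2 := PySem.List.length_of_pop?_eq_some _ h2
    simp only [] at e1 e2
    omega
  · omega

def remove_messages (sender_number : String) (chat_log : List String) : List String :=
  removeLoopA sender_number 0 chat_log

-- ===== PORT B =====
-- B's while-loop: walk i by 2 over the fixed log, appending each kept pair slice.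
def removeLoopB (s : String) (log : List String) (i : Nat) (kept : List String) : List String :=
  if h : i < log.length then
    let kept' :=
      if PySem.Str.startswith (log[i]'h) s then kept
      else kept ++ PySem.List.slice log (some (i : Int)) (some ((i : Int) + 2))
    removeLoopB s log (i + 2) kept'
  else kept
termination_by log.length - i

def remove_messages_alt (sender_number : String) (chat_log : List String) : List String :=
  removeLoopB sender_number chat_log 0 []

-- ===== PRECONDITION & SPEC =====
-- Pre_ excludes exactly the inputs where A raises IndexError: an odd-length log whose
-- last (unpaired) entry starts with sender_number (the second pop(i) fails there).
def Pre_remove_messages (sender_number : String) (chat_log : List String) : Prop :=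
  chat_log.length % 2 = 1 →
    (chat_log.getLast?.all (fun x => !PySem.Str.startswith x sender_number)) = true
instance (sender_number : String) (chat_log : List String) : Decidable (Pre_remove_messages sender_number chat_log) := by unfold Pre_remove_messages; infer_instance

def pvWitness_remove_messages : String × List String := ("5", ["5a", "hi", "ab", "cd"])

def Spec_remove_messages (sender_number : String) (chat_log : List String) (out : List String) : Prop := out = remove_messages_alt sender_number chat_log
instance (sender_number : String) (chat_log : List String) (out : List String) : Decidable (Spec_remove_messages sender_number chat_log out) := by unfold Spec_remove_messages; infer_instance

-- ===== CLAIM (what is proved, stated in full; the proofs are below) =====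
def Claim_equal_remove_messages : Prop := ∀ (sender_number : String) (chat_log : List String), Dom_remove_messages sender_number chat_log → Pre_remove_messages sender_number chat_log → Spec_remove_messages sender_number chat_log (remove_messages sender_number chat_log)


-- ===== LEMMAS AND PROOFS =====

-- h.find(s) == 0 is exactly h.startswith(s)
theorem find_zero_iff_startswith (h s : String) :
    PySem.Str.find h s = 0 ↔ PySem.Str.startswith h s = true := by
  simp only [PySem.Str.find_eq, PySem.Str.startswith_eq, PySem.Chars.startswith_iff]
  constructor
  · intro h0
    have hs := PySem.Chars.find_spec (s := h.toList) (sub := s.toList) (by rw [h0])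
    rw [h0] at hs
    simpa using hs.1
  · intro hp
    have hnn : 0 ≤ PySem.Chars.find h.toList s.toList := by
      rw [PySem.Chars.find_nonneg_iff]
      exact hp.isInfix
    have hs := PySem.Chars.find_spec hnn
    by_contra hne
    exact hs.2 0 (by omega) (by simpa using hp)

-- reference function for A: process the log two entries at a time (A's find-test)
def pairsF (s : String) : List String → List String
  | [] => []
  | [h] => [h]
  | h :: m :: t => if PySem.Str.find h s = 0 then pairsF s t else h :: m :: pairsF s t

-- reference function for B: same pairs walk with B's startswith-test (a matching
-- dangling last entry is skipped, where A raises)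
def pairsB (s : String) : List String → List String
  | [] => []
  | [h] => if PySem.Str.startswith h s then [] else [h]
  | h :: m :: t => if PySem.Str.startswith h s then pairsB s t else h :: m :: pairsB s t

-- A's loop computes pairsF on the unprocessed suffix (when it does not raise)
theorem loopA_eq (s : String) (rest pre : List String)
    (H : rest.length % 2 = 1 → ∀ x, rest.getLast? = some x → PySem.Str.find x s ≠ 0) :
    removeLoopA s pre.length (pre ++ rest) = pre ++ pairsF s rest := by
  match rest with
  | [] =>
    rw [removeLoopA.eq_def]
    simp [pairsF]
  | [h] =>
    have hi : pre.length < (pre ++ [h]).length := by simp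
    have hget : (pre ++ [h])[pre.length]'hi = h := by
      rw [List.getElem_append_right le_rfl]
      simp
    have hfind : ¬ PySem.Str.find h s = 0 := H (by simp) h (by simp)
    rw [removeLoopA.eq_def, dif_pos hi, hget, if_neg hfind, removeLoopA.eq_def]
    simp [pairsF]
  | h :: m :: t =>
    have H' : t.length % 2 = 1 → ∀ x, t.getLast? = some x → PySem.Str.find x s ≠ 0 := by
      intro ho x hx
      apply H
      · simp only [List.length_cons]
        omega
      · have hne : t ≠ [] := by
          intro he
          rw [he] at ho
          simp at ho
        obtain ⟨y, t', rfl⟩ := List.exists_cons_of_ne_nil hne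
        rw [List.getLast?_cons_cons, List.getLast?_cons_cons]
        exact hx
    have hi : pre.length < (pre ++ h :: m :: t).length := by simp
    have hget : (pre ++ h :: m :: t)[pre.length]'hi = h := by
      rw [List.getElem_append_right le_rfl]
      simp
    rw [removeLoopA.eq_def, dif_pos hi, hget]
    by_cases hf : PySem.Str.find h s = 0
    · rw [if_pos hf]
      have h1 : PySem.List.pop? (pre ++ h :: m :: t) (pre.length : Int) =
          some (h, pre ++ m :: t) := by
        rw [PySem.List.pop?_natCast _ _ hi, hget]
        rw [List.eraseIdx_append_of_length_le le_rfl]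
        simp
      have hi2 : pre.length < (pre ++ m :: t).length := by simp
      have h2 : PySem.List.pop? (pre ++ m :: t) (pre.length : Int) =
          some (m, pre ++ t) := by
        rw [PySem.List.pop?_natCast _ _ hi2]
        rw [List.getElem_append_right le_rfl, List.eraseIdx_append_of_length_le le_rfl]
        simp
      split
      · rename_i fst l1 heq
        rw [h1] at heq
        obtain ⟨h3, h4⟩ : h = fst ∧ pre ++ m :: t = l1 := by simpa using heq
        subst h3; subst h4
        split
        · rename_i fst2 l2 heq2
          rw [h2] at heq2
          obtain ⟨h5, h6⟩ : m = fst2 ∧ pre ++ t = l2 := by simpa using heq2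
          subst h5; subst h6
          rw [loopA_eq s t pre H']
          rw [show pairsF s (h :: m :: t) = pairsF s t from by rw [pairsF, if_pos hf]]
        · rename_i heq2
          rw [h2] at heq2
          simp at heq2
      · rename_i heq
        rw [h1] at heq
        simp at heq
    · rw [if_neg hf]
      have e1 : pre ++ h :: m :: t = (pre ++ [h, m]) ++ t := by simp
      have e2 : pre.length + 2 = (pre ++ [h, m]).length := by simp
      rw [e1, e2, loopA_eq s t (pre ++ [h, m]) H']
      rw [show pairsF s (h :: m :: t) = h :: m :: pairsF s t from by rw [pairsF, if_neg hf]]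
      simp
termination_by rest.length

-- B's loop computes pairsB on the suffix from i
theorem loopB_eq (s : String) (log kept : List String) (i : Nat) :
    removeLoopB s log i kept = kept ++ pairsB s (log.drop i) := by
  rw [removeLoopB.eq_def]
  by_cases h : i < log.length
  · rw [dif_pos h]
    have hd : log.drop i = log[i] :: log.drop (i + 1) := List.drop_eq_getElem_cons h
    have hrec := loopB_eq s log
      (if PySem.Str.startswith (log[i]'h) s then kept
       else kept ++ PySem.List.slice log (some (i : Int)) (some ((i : Int) + 2))) (i + 2)
    simp only at hrec ⊢
    rw [hrec]
    have hslice : PySem.List.slice log (some (i : Int)) (some ((i : Int) + 2)) =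
        (log.drop i).take 2 := by
      have := PySem.List.slice_natCast_add log i 2
      simpa using this
    by_cases hs : PySem.Str.startswith (log[i]'h) s
    · rw [if_pos hs]
      by_cases h2 : i + 1 < log.length
      · have hd2 : log.drop (i + 1) = log[i + 1] :: log.drop (i + 2) :=
          List.drop_eq_getElem_cons h2
        rw [hd, hd2, pairsB]
        rw [if_pos hs]
      · have hd2 : log.drop (i + 1) = [] := List.drop_eq_nil_of_le (by omega)
        have hd3 : log.drop (i + 2) = [] := List.drop_eq_nil_of_le (by omega)
        rw [hd, hd2, hd3]
        simp only [pairsB]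
        rw [if_pos hs]
    · rw [if_neg hs, hslice]
      by_cases h2 : i + 1 < log.length
      · have hd2 : log.drop (i + 1) = log[i + 1] :: log.drop (i + 2) :=
          List.drop_eq_getElem_cons h2
        have ht : List.take 2 (List.drop i log) = [log[i], log[i + 1]] := by
          rw [hd, hd2]
          simp only [List.take_succ_cons, List.take_zero]
        rw [ht, hd, hd2, pairsB, if_neg hs]
        simp
      · have hd2 : log.drop (i + 1) = [] := List.drop_eq_nil_of_le (by omega)
        have hd3 : log.drop (i + 2) = [] := List.drop_eq_nil_of_le (by omega)
        rw [hd, hd2, hd3]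
        simp only [pairsB]
        rw [if_neg hs]
        simp
  · rw [dif_neg h]
    rw [List.drop_eq_nil_of_le (by omega)]
    simp [pairsB]
termination_by log.length - i

-- under Pre_ (no matching dangling last entry) the two pairs walks agree
theorem pairsF_eq_pairsB (s : String) (rest : List String)
    (H : rest.length % 2 = 1 → ∀ x, rest.getLast? = some x →
      PySem.Str.startswith x s = false) :
    pairsF s rest = pairsB s rest := by
  match rest with
  | [] => rfl
  | [h] =>
    have hs : PySem.Str.startswith h s = false := H (by simp) h (by simp)
    rw [pairsF, pairsB, hs]
    simp
  | h :: m :: t =>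
    have H' : t.length % 2 = 1 → ∀ x, t.getLast? = some x →
        PySem.Str.startswith x s = false := by
      intro ho x hx
      apply H
      · simp only [List.length_cons]
        omega
      · have hne : t ≠ [] := by
          intro he
          rw [he] at ho
          simp at ho
        obtain ⟨y, t', rfl⟩ := List.exists_cons_of_ne_nil hne
        rw [List.getLast?_cons_cons, List.getLast?_cons_cons]
        exact hx
    have hiff : (PySem.Str.find h s = 0) ↔ (PySem.Str.startswith h s = true) :=
      find_zero_iff_startswith h s
    rw [pairsF, pairsB, pairsF_eq_pairsB s t H']
    by_cases hs : PySem.Str.startswith h s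
    · rw [if_pos hs, if_pos (hiff.mpr hs)]
    · rw [if_neg hs, if_neg (fun hf => hs (hiff.mp hf))]
termination_by rest.length

-- ===== VERDICT =====
theorem remove_messages_spec : Claim_equal_remove_messages := by
  intro s log _hdom hpre
  unfold Spec_remove_messages remove_messages remove_messages_alt
  have Hsw : log.length % 2 = 1 → ∀ x, log.getLast? = some x →
      PySem.Str.startswith x s = false := by
    intro ho x hx
    have := hpre ho
    rw [hx] at this
    simpa using this
  have Hf : log.length % 2 = 1 → ∀ x, log.getLast? = some x →
      PySem.Str.find x s ≠ 0 := by
    intro ho x hx hf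
    have := Hsw ho x hx
    rw [(find_zero_iff_startswith x s).mp hf] at this
    exact absurd this (by simp)
  have ha := loopA_eq s log [] Hf
  simp only [List.nil_append, List.length_nil] at ha
  rw [ha, loopB_eq]
  simp [pairsF_eq_pairsB s log Hsw]
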